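-- pv_equiv track=rewrite | github.com/TebibuS/BBBdatagetsbetter | BBB_Library/FuzzyTesting/test.py | standardize_address
-- ===== SOURCE A (Python) =====
-- def standardize_address(address):
--     replacements = {
--         'Street': 'St.',
--         'Avenue': 'Ave.',
--         'Boulevard': 'Blvd.',
--         'Drive': 'Dr.',
--         'Road': 'Rd.'
--     }
--     for long, short in replacements.items():
--         address = address.replace(long, short)
--     return address
-- ===== SOURCE B (Python) =====
-- def standardize_address(address):
--     mapping = {
--         'Street': 'St.',
--         'Avenue': 'Ave.',
--         'Boulevard': 'Blvd.',
--         'Drive': 'Dr.',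
--         'Road': 'Rd.'
--     }
--     out = []
--     i = 0
--     n = len(address)
--     while i < n:
--         for key, short in mapping.items():
--             if address.startswith(key, i):
--                 out.append(short)
--                 i += len(key)
--                 break
--         else:
--             out.append(address[i])
--             i += 1
--     return ''.join(out)
-- ===== Notes on version B (the rewrite author's own statement) =====
-- stated objective: alternative
-- what changed: Replaces five sequential full-string str.replace passes with a single left-to-right scan that consults the abbreviation table at each position and copies or substitutes as it goes.
import Mathlib
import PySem

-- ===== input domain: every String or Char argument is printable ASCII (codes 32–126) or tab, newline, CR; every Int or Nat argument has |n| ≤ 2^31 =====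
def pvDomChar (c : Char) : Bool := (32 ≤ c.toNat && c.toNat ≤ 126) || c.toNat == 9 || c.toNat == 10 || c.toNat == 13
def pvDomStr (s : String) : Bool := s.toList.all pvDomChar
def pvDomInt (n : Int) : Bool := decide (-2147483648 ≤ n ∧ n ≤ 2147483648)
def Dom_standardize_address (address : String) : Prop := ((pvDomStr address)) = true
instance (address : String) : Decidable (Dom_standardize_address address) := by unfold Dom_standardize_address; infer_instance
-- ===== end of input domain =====

-- B replaces A's five sequential full-string replace passes with a single left-to-right
-- table-driven scan (alternative decomposition; same result, no speed claim).


-- ===== PORT A =====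
-- literal port: build the dict, then fold the five .replace passes over its items
def standardize_address (address : String) : String :=
  let replacements : PySem.Dict String String :=
    ((((((PySem.Dict.empty : PySem.Dict String String).insert "Street" "St.").insert
        "Avenue" "Ave.").insert "Boulevard" "Blvd.").insert "Drive" "Dr.").insert "Road" "Rd.")
  replacements.items.foldl (fun a p => PySem.Str.replace a p.1 p.2) address

-- ===== PORT B =====
-- B's abbreviation table, in the same (dict) order
def pvTable : List (List Char × List Char) :=
  [("Street".toList, "St.".toList), ("Avenue".toList, "Ave.".toList),
   ("Boulevard".toList, "Blvd.".toList), ("Drive".toList, "Dr.".toList),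
   ("Road".toList, "Rd.".toList)]

-- B's single scan: at each position take the first table key that matches, else copy the char
def pvScan (s : List Char) : List Char :=
  match hf : pvTable.find? (fun kv => kv.1.isPrefixOf s) with
  | some kv => kv.2 ++ pvScan (s.drop kv.1.length)
  | none =>
    match s with
    | [] => []
    | c :: t => c :: pvScan t
termination_by s.length
decreasing_by
  · have hmem := List.mem_of_find?_eq_some hf
    have hp := List.find?_some hf
    simp only [decide_eq_true_eq] at hp
    have hpre : kv.1 <+: s := List.isPrefixOf_iff_prefix.mp hp
    have hle := hpre.length_le
    have hpos : 0 < kv.1.length := by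
      simp only [pvTable, List.mem_cons, List.not_mem_nil, or_false] at hmem
      rcases hmem with h | h | h | h | h <;> subst h <;> decide
    simp only [List.length_drop]
    omega
  · simp

def standardize_address_alt (address : String) : String :=
  String.ofList (pvScan address.toList)

-- ===== PRECONDITION & SPEC =====
def Spec_standardize_address (address : String) (out : String) : Prop := out = standardize_address_alt address
instance (address : String) (out : String) : Decidable (Spec_standardize_address address out) := by unfold Spec_standardize_address; infer_instance

-- ===== CLAIM (what is proved, stated in full; the proofs are below) =====
def Claim_equal_standardize_address : Prop := ∀ (address : String), Dom_standardize_address address → Spec_standardize_address address (standardize_address address)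

-- ===== LEMMAS AND PROOFS =====

-- clean structural form of one Python str.replace pass (old nonempty)
def repl (old new : List Char) : List Char → List Char
  | [] => []
  | c :: t =>
    if old.isPrefixOf (c :: t) then new ++ repl old new (t.drop (old.length - 1))
    else c :: repl old new t
termination_by l => l.length
decreasing_by
  · simp only [List.length_drop, List.length_cons]; omega
  · simp

theorem repl_nil (old new : List Char) : repl old new [] = [] := by rw [repl]

theorem repl_cons_pos (old new : List Char) (c : Char) (t : List Char)
    (h : old.isPrefixOf (c :: t) = true) :
    repl old new (c :: t) = new ++ repl old new (t.drop (old.length - 1)) := by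
  rw [repl, if_pos h]

theorem repl_cons_neg (old new : List Char) (c : Char) (t : List Char)
    (h : ¬ old.isPrefixOf (c :: t) = true) :
    repl old new (c :: t) = c :: repl old new t := by
  rw [repl, if_neg h]

theorem repl_go_eq (old new : List Char) (h : old ≠ []) :
    ∀ fuel l acc, l.length ≤ fuel →
      PySem.Chars.replace.go old new fuel l acc = acc.reverse ++ repl old new l := by
  intro fuel
  induction fuel with
  | zero =>
    intro l acc hl
    have : l = [] := by cases l <;> simp_all
    subst this
    simp [PySem.Chars.replace.go, repl_nil]
  | succ n ih =>
    intro l acc hl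
    cases l with
    | nil => simp [PySem.Chars.replace.go, repl_nil]
    | cons c t =>
      rw [PySem.Chars.replace.go]
      by_cases hp : old.isPrefixOf (c :: t) = true
      · rw [if_pos hp]
        obtain ⟨a, o', rfl⟩ : ∃ a o', old = a :: o' := by
          cases old with
          | nil => exact absurd rfl h
          | cons a o' => exact ⟨a, o', rfl⟩
        have hdrop : (c :: t).drop (a :: o').length = t.drop ((a :: o').length - 1) := by
          simp
        rw [hdrop, ih _ _ (by
          have := List.length_drop (l := t) (i := (a :: o').length - 1)
          simp at hl ⊢
          omega)]
        rw [repl_cons_pos _ _ _ _ hp]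
        simp
      · rw [if_neg hp, ih _ _ (by simp at hl; omega), repl_cons_neg _ _ _ _ hp]
        simp

theorem replace_eq_repl (s old new : List Char) (h : old ≠ []) :
    PySem.Chars.replace s old new = repl old new s := by
  unfold PySem.Chars.replace
  rw [if_neg (by simp [List.isEmpty_iff, h])]
  simpa using repl_go_eq old new h s.length s [] le_rfl

-- a pass whose key has head a distributes over a prefix not containing a
theorem repl_append_notmem (a : Char) (o' new : List Char) :
    ∀ p X, a ∉ p → repl (a :: o') new (p ++ X) = p ++ repl (a :: o') new X := by
  intro p
  induction p with
  | nil => intro X _; simp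
  | cons c p' ih =>
    intro X hmem
    have hac : ¬ (a = c) := by intro hh; exact hmem (hh ▸ List.mem_cons_self)
    have hnp : ¬ (a :: o').isPrefixOf (c :: (p' ++ X)) = true := by
      simp [List.isPrefixOf, hac]
    rw [List.cons_append, repl_cons_neg _ _ _ _ hnp, ih X (fun hx => hmem (List.mem_cons_of_mem _ hx))]
    simp

theorem repl_prefix (a : Char) (o' new X : List Char) :
    repl (a :: o') new ((a :: o') ++ X) = new ++ repl (a :: o') new X := by
  have hp : (a :: o').isPrefixOf (a :: (o' ++ X)) = true :=
    List.isPrefixOf_iff_prefix.mpr ⟨X, by simp⟩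
  rw [List.cons_append, repl_cons_pos _ _ _ _ hp]
  simp

-- if the replacement's head b does not occur in k, a k-prefix of the output was already a k-prefix of the input
theorem repl_pullback (old : List Char) (b : Char) (new' : List Char) :
    ∀ (n : Nat) (s k : List Char), s.length ≤ n → b ∉ k →
      k.isPrefixOf (repl old (b :: new') s) = true → k.isPrefixOf s = true := by
  intro n
  induction n with
  | zero =>
    intro s k hl hb hk
    have : s = [] := by cases s <;> simp_all
    subst this
    simpa [repl_nil] using hk
  | succ n ih =>
    intro s k hl hb hk
    cases s with
    | nil => simpa [repl_nil] using hk
    | cons c t =>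
      by_cases hp : old.isPrefixOf (c :: t) = true
      · rw [repl_cons_pos _ _ _ _ hp] at hk
        cases k with
        | nil => simp [List.isPrefixOf]
        | cons d k' =>
          exfalso
          simp only [List.cons_append, List.isPrefixOf, Bool.and_eq_true, beq_iff_eq] at hk
          exact hb (hk.1 ▸ List.mem_cons_self)
      · rw [repl_cons_neg _ _ _ _ hp] at hk
        cases k with
        | nil => simp [List.isPrefixOf]
        | cons d k' =>
          simp only [List.isPrefixOf, List.cons_append, Bool.and_eq_true, beq_iff_eq] at hk ⊢
          exact ⟨hk.1, ih t k' (by simp at hl; omega) (fun hx => hb (List.mem_cons_of_mem _ hx)) hk.2⟩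

-- specializations of replace_eq_repl to the five nonempty keys
theorem replace_key1 (s : List Char) :
    PySem.Chars.replace s "Street".toList "St.".toList = repl "Street".toList "St.".toList s :=
  replace_eq_repl _ _ _ (by decide)

theorem replace_key2 (s : List Char) :
    PySem.Chars.replace s "Avenue".toList "Ave.".toList = repl "Avenue".toList "Ave.".toList s :=
  replace_eq_repl _ _ _ (by decide)

theorem replace_key3 (s : List Char) :
    PySem.Chars.replace s "Boulevard".toList "Blvd.".toList = repl "Boulevard".toList "Blvd.".toList s :=
  replace_eq_repl _ _ _ (by decide)

theorem replace_key4 (s : List Char) :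
    PySem.Chars.replace s "Drive".toList "Dr.".toList = repl "Drive".toList "Dr.".toList s :=
  replace_eq_repl _ _ _ (by decide)

theorem replace_key5 (s : List Char) :
    PySem.Chars.replace s "Road".toList "Rd.".toList = repl "Road".toList "Rd.".toList s :=
  replace_eq_repl _ _ _ (by decide)

-- pvScan unfolding lemmas
theorem pvScan_some (s : List Char) (kv : List Char × List Char)
    (h : pvTable.find? (fun kv => kv.1.isPrefixOf s) = some kv) :
    pvScan s = kv.2 ++ pvScan (s.drop kv.1.length) := by
  rw [pvScan.eq_def]
  split
  · next kv2 hf =>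
    rw [h] at hf; cases hf; rfl
  · next hf =>
    rw [h] at hf; cases hf

theorem pvScan_nil : pvScan [] = [] := by
  rw [pvScan.eq_def]
  split
  · next kv hf =>
    have hnone : pvTable.find? (fun kv => kv.1.isPrefixOf ([] : List Char)) = none := by decide
    rw [hnone] at hf; cases hf
  · rfl

theorem pvScan_cons_none (c : Char) (t : List Char)
    (h : pvTable.find? (fun kv => kv.1.isPrefixOf (c :: t)) = none) :
    pvScan (c :: t) = c :: pvScan t := by
  rw [pvScan.eq_def]
  split
  · next kv hf => rw [h] at hf; cases hf
  · rfl

-- instantiated pullbacks: a later key-prefix of an earlier pass output was a prefix of its input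
theorem pullback1 (s k : List Char) (hb : 'S' ∉ k)
    (hk : k.isPrefixOf (repl "Street".toList "St.".toList s) = true) : k.isPrefixOf s = true := by
  have e : "St.".toList = 'S' :: "t.".toList := rfl
  rw [e] at hk
  exact repl_pullback "Street".toList 'S' "t.".toList s.length s k le_rfl hb hk

theorem pullback2 (s k : List Char) (hb : 'A' ∉ k)
    (hk : k.isPrefixOf (repl "Avenue".toList "Ave.".toList s) = true) : k.isPrefixOf s = true := by
  have e : "Ave.".toList = 'A' :: "ve.".toList := rfl
  rw [e] at hk
  exact repl_pullback "Avenue".toList 'A' "ve.".toList s.length s k le_rfl hb hk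

theorem pullback3 (s k : List Char) (hb : 'B' ∉ k)
    (hk : k.isPrefixOf (repl "Boulevard".toList "Blvd.".toList s) = true) : k.isPrefixOf s = true := by
  have e : "Blvd.".toList = 'B' :: "lvd.".toList := rfl
  rw [e] at hk
  exact repl_pullback "Boulevard".toList 'B' "lvd.".toList s.length s k le_rfl hb hk

theorem pullback4 (s k : List Char) (hb : 'D' ∉ k)
    (hk : k.isPrefixOf (repl "Drive".toList "Dr.".toList s) = true) : k.isPrefixOf s = true := by
  have e : "Dr.".toList = 'D' :: "r.".toList := rfl
  rw [e] at hk
  exact repl_pullback "Drive".toList 'D' "r.".toList s.length s k le_rfl hb hk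

-- the composition of the five passes equals the single scan
theorem chain_eq_pvScan : ∀ (n : Nat) (s : List Char), s.length ≤ n →
    repl "Road".toList "Rd.".toList (repl "Drive".toList "Dr.".toList (repl "Boulevard".toList "Blvd.".toList (repl "Avenue".toList "Ave.".toList (repl "Street".toList "St.".toList (s))))) = pvScan s := by
  intro n
  induction n with
  | zero =>
    intro s hl
    have hs : s = [] := by cases s <;> simp_all
    subst hs
    simp [repl_nil, pvScan_nil]
  | succ n ih =>
    intro s hl
    by_cases h1 : "Street".toList.isPrefixOf s = true
    · obtain ⟨s2, rfl⟩ := List.isPrefixOf_iff_prefix.mp h1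
      have hlen : ("Street".toList ++ s2).length ≤ n + 1 := hl
      simp only [List.length_append] at hlen
      have d1 : ∀ X, repl "Street".toList "St.".toList ("Street".toList ++ X) = "St.".toList ++ repl "Street".toList "St.".toList X := by
        intro X
        have e : "Street".toList = 'S' :: "treet".toList := rfl
        rw [e]
        exact repl_prefix _ _ _ _
      have d2 : ∀ X, repl "Avenue".toList "Ave.".toList ("St.".toList ++ X) = "St.".toList ++ repl "Avenue".toList "Ave.".toList X := by
        intro X
        have e : "Avenue".toList = 'A' :: "venue".toList := rfl
        rw [e]
        exact repl_append_notmem _ _ _ _ _ (by decide)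
      have d3 : ∀ X, repl "Boulevard".toList "Blvd.".toList ("St.".toList ++ X) = "St.".toList ++ repl "Boulevard".toList "Blvd.".toList X := by
        intro X
        have e : "Boulevard".toList = 'B' :: "oulevard".toList := rfl
        rw [e]
        exact repl_append_notmem _ _ _ _ _ (by decide)
      have d4 : ∀ X, repl "Drive".toList "Dr.".toList ("St.".toList ++ X) = "St.".toList ++ repl "Drive".toList "Dr.".toList X := by
        intro X
        have e : "Drive".toList = 'D' :: "rive".toList := rfl
        rw [e]
        exact repl_append_notmem _ _ _ _ _ (by decide)
      have d5 : ∀ X, repl "Road".toList "Rd.".toList ("St.".toList ++ X) = "St.".toList ++ repl "Road".toList "Rd.".toList X := by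
        intro X
        have e : "Road".toList = 'R' :: "oad".toList := rfl
        rw [e]
        exact repl_append_notmem _ _ _ _ _ (by decide)
      have hf : pvTable.find? (fun kv => kv.1.isPrefixOf ("Street".toList ++ s2)) = some ("Street".toList, "St.".toList) := by
        simp [pvTable, List.find?_cons, h1]
      rw [d1, d2, d3, d4, d5, pvScan_some _ _ hf]
      have hdrop : ("Street".toList ++ s2).drop ("Street".toList, "St.".toList).1.length = s2 := by simp
      rw [hdrop]
      have hkl : ("Street".toList).length = 6 := rfl
      exact congrArg (fun z => ("Street".toList, "St.".toList).2 ++ z) (ih s2 (by omega))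
    by_cases h2 : "Avenue".toList.isPrefixOf s = true
    · obtain ⟨s2, rfl⟩ := List.isPrefixOf_iff_prefix.mp h2
      have hlen : ("Avenue".toList ++ s2).length ≤ n + 1 := hl
      simp only [List.length_append] at hlen
      have d1 : ∀ X, repl "Street".toList "St.".toList ("Avenue".toList ++ X) = "Avenue".toList ++ repl "Street".toList "St.".toList X := by
        intro X
        have e : "Street".toList = 'S' :: "treet".toList := rfl
        rw [e]
        exact repl_append_notmem _ _ _ _ _ (by decide)
      have d2 : ∀ X, repl "Avenue".toList "Ave.".toList ("Avenue".toList ++ X) = "Ave.".toList ++ repl "Avenue".toList "Ave.".toList X := by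
        intro X
        have e : "Avenue".toList = 'A' :: "venue".toList := rfl
        rw [e]
        exact repl_prefix _ _ _ _
      have d3 : ∀ X, repl "Boulevard".toList "Blvd.".toList ("Ave.".toList ++ X) = "Ave.".toList ++ repl "Boulevard".toList "Blvd.".toList X := by
        intro X
        have e : "Boulevard".toList = 'B' :: "oulevard".toList := rfl
        rw [e]
        exact repl_append_notmem _ _ _ _ _ (by decide)
      have d4 : ∀ X, repl "Drive".toList "Dr.".toList ("Ave.".toList ++ X) = "Ave.".toList ++ repl "Drive".toList "Dr.".toList X := by
        intro X
        have e : "Drive".toList = 'D' :: "rive".toList := rfl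
        rw [e]
        exact repl_append_notmem _ _ _ _ _ (by decide)
      have d5 : ∀ X, repl "Road".toList "Rd.".toList ("Ave.".toList ++ X) = "Ave.".toList ++ repl "Road".toList "Rd.".toList X := by
        intro X
        have e : "Road".toList = 'R' :: "oad".toList := rfl
        rw [e]
        exact repl_append_notmem _ _ _ _ _ (by decide)
      have hf : pvTable.find? (fun kv => kv.1.isPrefixOf ("Avenue".toList ++ s2)) = some ("Avenue".toList, "Ave.".toList) := by
        simp [pvTable, List.find?_cons, h1, h2]
      rw [d1, d2, d3, d4, d5, pvScan_some _ _ hf]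
      have hdrop : ("Avenue".toList ++ s2).drop ("Avenue".toList, "Ave.".toList).1.length = s2 := by simp
      rw [hdrop]
      have hkl : ("Avenue".toList).length = 6 := rfl
      exact congrArg (fun z => ("Avenue".toList, "Ave.".toList).2 ++ z) (ih s2 (by omega))
    by_cases h3 : "Boulevard".toList.isPrefixOf s = true
    · obtain ⟨s2, rfl⟩ := List.isPrefixOf_iff_prefix.mp h3
      have hlen : ("Boulevard".toList ++ s2).length ≤ n + 1 := hl
      simp only [List.length_append] at hlen
      have d1 : ∀ X, repl "Street".toList "St.".toList ("Boulevard".toList ++ X) = "Boulevard".toList ++ repl "Street".toList "St.".toList X := by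
        intro X
        have e : "Street".toList = 'S' :: "treet".toList := rfl
        rw [e]
        exact repl_append_notmem _ _ _ _ _ (by decide)
      have d2 : ∀ X, repl "Avenue".toList "Ave.".toList ("Boulevard".toList ++ X) = "Boulevard".toList ++ repl "Avenue".toList "Ave.".toList X := by
        intro X
        have e : "Avenue".toList = 'A' :: "venue".toList := rfl
        rw [e]
        exact repl_append_notmem _ _ _ _ _ (by decide)
      have d3 : ∀ X, repl "Boulevard".toList "Blvd.".toList ("Boulevard".toList ++ X) = "Blvd.".toList ++ repl "Boulevard".toList "Blvd.".toList X := by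
        intro X
        have e : "Boulevard".toList = 'B' :: "oulevard".toList := rfl
        rw [e]
        exact repl_prefix _ _ _ _
      have d4 : ∀ X, repl "Drive".toList "Dr.".toList ("Blvd.".toList ++ X) = "Blvd.".toList ++ repl "Drive".toList "Dr.".toList X := by
        intro X
        have e : "Drive".toList = 'D' :: "rive".toList := rfl
        rw [e]
        exact repl_append_notmem _ _ _ _ _ (by decide)
      have d5 : ∀ X, repl "Road".toList "Rd.".toList ("Blvd.".toList ++ X) = "Blvd.".toList ++ repl "Road".toList "Rd.".toList X := by
        intro X
        have e : "Road".toList = 'R' :: "oad".toList := rfl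
        rw [e]
        exact repl_append_notmem _ _ _ _ _ (by decide)
      have hf : pvTable.find? (fun kv => kv.1.isPrefixOf ("Boulevard".toList ++ s2)) = some ("Boulevard".toList, "Blvd.".toList) := by
        simp [pvTable, List.find?_cons, h1, h2, h3]
      rw [d1, d2, d3, d4, d5, pvScan_some _ _ hf]
      have hdrop : ("Boulevard".toList ++ s2).drop ("Boulevard".toList, "Blvd.".toList).1.length = s2 := by simp
      rw [hdrop]
      have hkl : ("Boulevard".toList).length = 9 := rfl
      exact congrArg (fun z => ("Boulevard".toList, "Blvd.".toList).2 ++ z) (ih s2 (by omega))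
    by_cases h4 : "Drive".toList.isPrefixOf s = true
    · obtain ⟨s2, rfl⟩ := List.isPrefixOf_iff_prefix.mp h4
      have hlen : ("Drive".toList ++ s2).length ≤ n + 1 := hl
      simp only [List.length_append] at hlen
      have d1 : ∀ X, repl "Street".toList "St.".toList ("Drive".toList ++ X) = "Drive".toList ++ repl "Street".toList "St.".toList X := by
        intro X
        have e : "Street".toList = 'S' :: "treet".toList := rfl
        rw [e]
        exact repl_append_notmem _ _ _ _ _ (by decide)
      have d2 : ∀ X, repl "Avenue".toList "Ave.".toList ("Drive".toList ++ X) = "Drive".toList ++ repl "Avenue".toList "Ave.".toList X := by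
        intro X
        have e : "Avenue".toList = 'A' :: "venue".toList := rfl
        rw [e]
        exact repl_append_notmem _ _ _ _ _ (by decide)
      have d3 : ∀ X, repl "Boulevard".toList "Blvd.".toList ("Drive".toList ++ X) = "Drive".toList ++ repl "Boulevard".toList "Blvd.".toList X := by
        intro X
        have e : "Boulevard".toList = 'B' :: "oulevard".toList := rfl
        rw [e]
        exact repl_append_notmem _ _ _ _ _ (by decide)
      have d4 : ∀ X, repl "Drive".toList "Dr.".toList ("Drive".toList ++ X) = "Dr.".toList ++ repl "Drive".toList "Dr.".toList X := by
        intro X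
        have e : "Drive".toList = 'D' :: "rive".toList := rfl
        rw [e]
        exact repl_prefix _ _ _ _
      have d5 : ∀ X, repl "Road".toList "Rd.".toList ("Dr.".toList ++ X) = "Dr.".toList ++ repl "Road".toList "Rd.".toList X := by
        intro X
        have e : "Road".toList = 'R' :: "oad".toList := rfl
        rw [e]
        exact repl_append_notmem _ _ _ _ _ (by decide)
      have hf : pvTable.find? (fun kv => kv.1.isPrefixOf ("Drive".toList ++ s2)) = some ("Drive".toList, "Dr.".toList) := by
        simp [pvTable, List.find?_cons, h1, h2, h3, h4]
      rw [d1, d2, d3, d4, d5, pvScan_some _ _ hf]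
      have hdrop : ("Drive".toList ++ s2).drop ("Drive".toList, "Dr.".toList).1.length = s2 := by simp
      rw [hdrop]
      have hkl : ("Drive".toList).length = 5 := rfl
      exact congrArg (fun z => ("Drive".toList, "Dr.".toList).2 ++ z) (ih s2 (by omega))
    by_cases h5 : "Road".toList.isPrefixOf s = true
    · obtain ⟨s2, rfl⟩ := List.isPrefixOf_iff_prefix.mp h5
      have hlen : ("Road".toList ++ s2).length ≤ n + 1 := hl
      simp only [List.length_append] at hlen
      have d1 : ∀ X, repl "Street".toList "St.".toList ("Road".toList ++ X) = "Road".toList ++ repl "Street".toList "St.".toList X := by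
        intro X
        have e : "Street".toList = 'S' :: "treet".toList := rfl
        rw [e]
        exact repl_append_notmem _ _ _ _ _ (by decide)
      have d2 : ∀ X, repl "Avenue".toList "Ave.".toList ("Road".toList ++ X) = "Road".toList ++ repl "Avenue".toList "Ave.".toList X := by
        intro X
        have e : "Avenue".toList = 'A' :: "venue".toList := rfl
        rw [e]
        exact repl_append_notmem _ _ _ _ _ (by decide)
      have d3 : ∀ X, repl "Boulevard".toList "Blvd.".toList ("Road".toList ++ X) = "Road".toList ++ repl "Boulevard".toList "Blvd.".toList X := by
        intro X
        have e : "Boulevard".toList = 'B' :: "oulevard".toList := rfl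
        rw [e]
        exact repl_append_notmem _ _ _ _ _ (by decide)
      have d4 : ∀ X, repl "Drive".toList "Dr.".toList ("Road".toList ++ X) = "Road".toList ++ repl "Drive".toList "Dr.".toList X := by
        intro X
        have e : "Drive".toList = 'D' :: "rive".toList := rfl
        rw [e]
        exact repl_append_notmem _ _ _ _ _ (by decide)
      have d5 : ∀ X, repl "Road".toList "Rd.".toList ("Road".toList ++ X) = "Rd.".toList ++ repl "Road".toList "Rd.".toList X := by
        intro X
        have e : "Road".toList = 'R' :: "oad".toList := rfl
        rw [e]
        exact repl_prefix _ _ _ _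
      have hf : pvTable.find? (fun kv => kv.1.isPrefixOf ("Road".toList ++ s2)) = some ("Road".toList, "Rd.".toList) := by
        simp [pvTable, List.find?_cons, h1, h2, h3, h4, h5]
      rw [d1, d2, d3, d4, d5, pvScan_some _ _ hf]
      have hdrop : ("Road".toList ++ s2).drop ("Road".toList, "Rd.".toList).1.length = s2 := by simp
      rw [hdrop]
      have hkl : ("Road".toList).length = 4 := rfl
      exact congrArg (fun z => ("Road".toList, "Rd.".toList).2 ++ z) (ih s2 (by omega))
    · cases s with
      | nil => simp [repl_nil, pvScan_nil]
      | cons c t =>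
        have hf : pvTable.find? (fun kv => kv.1.isPrefixOf (c :: t)) = none := by
          rw [List.find?_eq_none]
          intro kv hkv
          simp only [pvTable, List.mem_cons, List.not_mem_nil, or_false] at hkv
          rcases hkv with h | h | h | h | h <;> subst h <;>
            simp only [decide_eq_true_eq] <;> assumption
        have z1 : repl "Street".toList "St.".toList (c :: t) = c :: repl "Street".toList "St.".toList t := repl_cons_neg _ _ _ _ h1
        have q2 : ¬ "Avenue".toList.isPrefixOf (repl "Street".toList "St.".toList (c :: t)) = true := fun hc => h2 (pullback1 _ _ (by decide) (hc))
        rw [z1] at q2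
        have z2 : repl "Avenue".toList "Ave.".toList (c :: repl "Street".toList "St.".toList t) = c :: repl "Avenue".toList "Ave.".toList (repl "Street".toList "St.".toList t) := repl_cons_neg _ _ _ _ q2
        have q3 : ¬ "Boulevard".toList.isPrefixOf (repl "Avenue".toList "Ave.".toList (repl "Street".toList "St.".toList (c :: t))) = true := fun hc => h3 (pullback1 _ _ (by decide) (pullback2 _ _ (by decide) (hc)))
        rw [z1, z2] at q3
        have z3 : repl "Boulevard".toList "Blvd.".toList (c :: repl "Avenue".toList "Ave.".toList (repl "Street".toList "St.".toList t)) = c :: repl "Boulevard".toList "Blvd.".toList (repl "Avenue".toList "Ave.".toList (repl "Street".toList "St.".toList t)) := repl_cons_neg _ _ _ _ q3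
        have q4 : ¬ "Drive".toList.isPrefixOf (repl "Boulevard".toList "Blvd.".toList (repl "Avenue".toList "Ave.".toList (repl "Street".toList "St.".toList (c :: t)))) = true := fun hc => h4 (pullback1 _ _ (by decide) (pullback2 _ _ (by decide) (pullback3 _ _ (by decide) (hc))))
        rw [z1, z2, z3] at q4
        have z4 : repl "Drive".toList "Dr.".toList (c :: repl "Boulevard".toList "Blvd.".toList (repl "Avenue".toList "Ave.".toList (repl "Street".toList "St.".toList t))) = c :: repl "Drive".toList "Dr.".toList (repl "Boulevard".toList "Blvd.".toList (repl "Avenue".toList "Ave.".toList (repl "Street".toList "St.".toList t))) := repl_cons_neg _ _ _ _ q4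
        have q5 : ¬ "Road".toList.isPrefixOf (repl "Drive".toList "Dr.".toList (repl "Boulevard".toList "Blvd.".toList (repl "Avenue".toList "Ave.".toList (repl "Street".toList "St.".toList (c :: t))))) = true := fun hc => h5 (pullback1 _ _ (by decide) (pullback2 _ _ (by decide) (pullback3 _ _ (by decide) (pullback4 _ _ (by decide) (hc)))))
        rw [z1, z2, z3, z4] at q5
        have z5 : repl "Road".toList "Rd.".toList (c :: repl "Drive".toList "Dr.".toList (repl "Boulevard".toList "Blvd.".toList (repl "Avenue".toList "Ave.".toList (repl "Street".toList "St.".toList t)))) = c :: repl "Road".toList "Rd.".toList (repl "Drive".toList "Dr.".toList (repl "Boulevard".toList "Blvd.".toList (repl "Avenue".toList "Ave.".toList (repl "Street".toList "St.".toList t)))) := repl_cons_neg _ _ _ _ q5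
        rw [z1, z2, z3, z4, z5, pvScan_cons_none _ _ hf]
        exact congrArg (fun z => c :: z) (ih t (by simp at hl; omega))

theorem standardize_address_toList (address : String) :
    (standardize_address address).toList =
      repl "Road".toList "Rd.".toList (repl "Drive".toList "Dr.".toList (repl "Boulevard".toList "Blvd.".toList (repl "Avenue".toList "Ave.".toList (repl "Street".toList "St.".toList address.toList)))) := by
  have hA : standardize_address address =
      PySem.Str.replace (PySem.Str.replace (PySem.Str.replace (PySem.Str.replace (PySem.Str.replace address "Street" "St.") "Avenue" "Ave.") "Boulevard" "Blvd.") "Drive" "Dr.") "Road" "Rd." := rfl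
  rw [hA]
  simp only [PySem.Str.toList_replace, replace_key1, replace_key2, replace_key3, replace_key4, replace_key5]

-- ===== VERDICT (by name: the statement is the Claim_ definition above) =====
theorem standardize_address_spec : Claim_equal_standardize_address := by
  intro address _
  unfold Spec_standardize_address standardize_address_alt
  refine String.toList_inj.mp ?_
  rw [standardize_address_toList]
  simp only [String.toList_ofList]
  exact chain_eq_pvScan address.toList.length address.toList le_rfl
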